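-- pv_equiv track=rewrite | github.com/braininahat/sigflow | src/sigflow/nodes/keypoints_overlay.py | _build_color_lut
-- ===== SOURCE A (Python) =====
-- _JOINT_COLORS: dict[str, tuple[int, int, int]] = {
--     # Tongue — posterior to anterior warm gradient
--     "vallecula":    (200, 120, 60),   # teal-blue
--     "tongueRoot":   (190, 160, 50),   # cyan-teal
--     "tongueBody":   (80, 200, 80),    # green
--     "tongueDorsum": (40, 210, 210),   # yellow
--     "tongueBlade":  (40, 160, 240),   # orange
--     "tongueTip":    (80, 100, 255),   # red-coral
--     # Bony landmarks
--     "hyoid":        (200, 160, 200),  # lavender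
--     "mandible":     (200, 160, 200),
--     "shortTendon":  (200, 160, 200),
--     "thyroid":      (200, 160, 200),
--     # Lips
--     "leftLip":      (100, 120, 240),  # coral
--     "rightLip":     (100, 120, 240),
--     "topleft":      (140, 100, 220),  # rose
--     "topmid":       (140, 100, 220),
--     "topright":     (140, 100, 220),
--     "bottomlefti":  (180, 80, 200),   # magenta (inner)
--     "bottommidi":   (180, 80, 200),
--     "bottomrighti": (180, 80, 200),
--     "bottomlefto":  (180, 120, 160),  # purple (outer)
--     "bottommido":   (180, 120, 160),
--     "bottomrighto": (180, 120, 160),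
-- }
--
-- _DEFAULT_COLOR = (0, 255, 0)  # green fallback
--
-- def _build_color_lut(joint_names: list[str]) -> list[tuple[int, int, int]]:
--     """Build a per-joint color lookup table from joint names via prefix matching."""
--     colors = []
--     for name in joint_names:
--         matched = _DEFAULT_COLOR
--         best_len = 0
--         for prefix, color in _JOINT_COLORS.items():
--             if name.startswith(prefix) and len(prefix) > best_len:
--                 matched = color
--                 best_len = len(prefix)
--         colors.append(matched)
--     return colors
-- ===== SOURCE B (Python) =====
-- _DEFAULT_COLOR = (0, 255, 0)
--
-- # Same data as the module table, organised by color group; flattened once into a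
-- # hash map keyed by prefix, plus the distinct prefix lengths, longest first.
-- _COLOR_GROUPS = [
--     ((200, 120, 60),  ["vallecula"]),
--     ((190, 160, 50),  ["tongueRoot"]),
--     ((80, 200, 80),   ["tongueBody"]),
--     ((40, 210, 210),  ["tongueDorsum"]),
--     ((40, 160, 240),  ["tongueBlade"]),
--     ((80, 100, 255),  ["tongueTip"]),
--     ((200, 160, 200), ["hyoid", "mandible", "shortTendon", "thyroid"]),
--     ((100, 120, 240), ["leftLip", "rightLip"]),
--     ((140, 100, 220), ["topleft", "topmid", "topright"]),
--     ((180, 80, 200),  ["bottomlefti", "bottommidi", "bottomrighti"]),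
--     ((180, 120, 160), ["bottomlefto", "bottommido", "bottomrighto"]),
-- ]
--
-- _BY_PREFIX = {p: color for color, ps in _COLOR_GROUPS for p in ps}
-- _LENGTHS = sorted({len(p) for p in _BY_PREFIX}, reverse=True)
--
--
-- def _color_for(name):
--     # Try each possible prefix length, longest first: slice the name and look the
--     # slice up in the hash map; the first hit is the longest matching prefix.
--     for L in _LENGTHS:
--         color = _BY_PREFIX.get(name[:L])
--         if color is not None:
--             return color
--     return _DEFAULT_COLOR
--
--
-- def _build_color_lut(joint_names: list[str]) -> list[tuple[int, int, int]]:
--     return [_color_for(name) for name in joint_names]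
-- ===== Notes on version B (the rewrite author's own statement) =====
-- stated objective: alternative
-- what changed: Instead of scanning all 21 prefixes per name with startswith and max-length tracking, B hash-indexes the table by prefix once, and per name slices the name at each of the 8 distinct prefix lengths (longest first) and looks the slice up in the hash map, returning on the first hit.
import Mathlib
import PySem

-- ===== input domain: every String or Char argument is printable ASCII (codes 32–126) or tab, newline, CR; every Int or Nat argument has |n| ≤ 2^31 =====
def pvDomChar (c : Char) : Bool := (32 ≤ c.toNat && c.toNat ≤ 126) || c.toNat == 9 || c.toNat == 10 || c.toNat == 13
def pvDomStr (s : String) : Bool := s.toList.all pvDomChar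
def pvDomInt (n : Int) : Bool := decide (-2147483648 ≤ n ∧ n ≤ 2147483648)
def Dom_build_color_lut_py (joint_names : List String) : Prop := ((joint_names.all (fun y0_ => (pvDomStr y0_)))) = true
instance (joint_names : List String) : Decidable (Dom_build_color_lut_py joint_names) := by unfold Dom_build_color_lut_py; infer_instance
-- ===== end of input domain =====

-- B replaces A's per-name startswith scan over all 21 prefixes (tracking the longest match) by a
-- hash map keyed by prefix built once: per name it slices the name at each distinct prefix length,
-- longest first, and returns the first slice found in the map (objective: alternative).

-- ===== PORT A =====
-- the module constant _JOINT_COLORS, in insertion order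
def pvTable : List (String × (Int × Int × Int)) :=
  [("vallecula", (200, 120, 60)), ("tongueRoot", (190, 160, 50)), ("tongueBody", (80, 200, 80)),
   ("tongueDorsum", (40, 210, 210)), ("tongueBlade", (40, 160, 240)), ("tongueTip", (80, 100, 255)),
   ("hyoid", (200, 160, 200)), ("mandible", (200, 160, 200)), ("shortTendon", (200, 160, 200)),
   ("thyroid", (200, 160, 200)), ("leftLip", (100, 120, 240)), ("rightLip", (100, 120, 240)),
   ("topleft", (140, 100, 220)), ("topmid", (140, 100, 220)), ("topright", (140, 100, 220)),
   ("bottomlefti", (180, 80, 200)), ("bottommidi", (180, 80, 200)), ("bottomrighti", (180, 80, 200)),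
   ("bottomlefto", (180, 120, 160)), ("bottommido", (180, 120, 160)), ("bottomrighto", (180, 120, 160))]

def pvDefaultColor : Int × Int × Int := (0, 255, 0)

-- the inner 'for prefix, color in _JOINT_COLORS.items()' loop body
def pvStepA (name : String) (st : (Int × Int × Int) × Int) (pc : String × (Int × Int × Int)) :
    (Int × Int × Int) × Int :=
  if PySem.Str.startswith name pc.1 = true ∧ PySem.Str.len pc.1 > st.2 then (pc.2, PySem.Str.len pc.1) else st

def build_color_lut_py (joint_names : List String) : List (Int × Int × Int) :=
  joint_names.foldl
    (fun colors name => colors ++ [(pvTable.foldl (pvStepA name) (pvDefaultColor, 0)).1]) []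

-- ===== PORT B =====
-- _COLOR_GROUPS: the same table keyed by color group
def pvGroups : List ((Int × Int × Int) × List String) :=
  [((200, 120, 60),  ["vallecula"]),
   ((190, 160, 50),  ["tongueRoot"]),
   ((80, 200, 80),   ["tongueBody"]),
   ((40, 210, 210),  ["tongueDorsum"]),
   ((40, 160, 240),  ["tongueBlade"]),
   ((80, 100, 255),  ["tongueTip"]),
   ((200, 160, 200), ["hyoid", "mandible", "shortTendon", "thyroid"]),
   ((100, 120, 240), ["leftLip", "rightLip"]),
   ((140, 100, 220), ["topleft", "topmid", "topright"]),
   ((180, 80, 200),  ["bottomlefti", "bottommidi", "bottomrighti"]),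
   ((180, 120, 160), ["bottomlefto", "bottommido", "bottomrighto"])]

-- _BY_PREFIX = {p: color for color, ps in _COLOR_GROUPS for p in ps}
def pvByPrefix : PySem.Dict String (Int × Int × Int) :=
  PySem.Dict.ofList (pvGroups.flatMap (fun g => g.2.map (fun p => (p, g.1))))

-- _LENGTHS = sorted({len(p) for p in _BY_PREFIX}, reverse=True)
def pvLengths : List Int :=
  PySem.List.sorted (PySem.Set.ofList ((PySem.Dict.keys pvByPrefix).map PySem.Str.len)) (fun x => x) true

-- the 'for L in _LENGTHS' loop of _color_for, with its early return and default fall-through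
def pvColorFor (name : String) : List Int → Int × Int × Int
  | [] => (0, 255, 0)
  | L :: rest =>
    match PySem.Dict.get? pvByPrefix (PySem.Str.slice name none (some L)) with
    | some color => color
    | none => pvColorFor name rest

def build_color_lut_py_alt (joint_names : List String) : List (Int × Int × Int) :=
  joint_names.map (fun name => pvColorFor name pvLengths)

-- ===== PRECONDITION & SPEC =====
def Spec_build_color_lut_py (joint_names : List String) (out : List (Int × Int × Int)) : Prop := out = build_color_lut_py_alt joint_names
instance (joint_names : List String) (out : List (Int × Int × Int)) : Decidable (Spec_build_color_lut_py joint_names out) := by unfold Spec_build_color_lut_py; infer_instance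

-- ===== CLAIM (what is proved, stated in full; the proofs are below) =====
def Claim_equal_build_color_lut_py : Prop := ∀ (joint_names : List String), Dom_build_color_lut_py joint_names → Spec_build_color_lut_py joint_names (build_color_lut_py joint_names)

-- ===== LEMMAS AND PROOFS =====

-- no key of the table is a (possibly improper) prefix of a different key
theorem pvTable_no_chain : ∀ pc ∈ pvTable, ∀ qc ∈ pvTable,
    pc.1.toList.isPrefixOf qc.1.toList = true → pc = qc := by decide

theorem pvTable_len_pos : ∀ pc ∈ pvTable, (0:Int) < PySem.Str.len pc.1 := by decide

-- the hash map holds exactly the table's pairs, with distinct keys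
theorem pvItems_sub : ∀ pc ∈ pvByPrefix.items, pc ∈ pvTable := by decide

theorem pvTable_sub : ∀ pc ∈ pvTable, pc ∈ pvByPrefix.items := by decide

theorem pvKeys_nodup : pvByPrefix.keys.Nodup := by decide

theorem pvLengths_mem : ∀ pc ∈ pvTable, PySem.Str.len pc.1 ∈ pvLengths := by decide

theorem pvLengths_nonneg : ∀ L ∈ pvLengths, (0:Int) ≤ L := by decide

theorem pv_startswith_iff (s p : String) :
    PySem.Str.startswith s p = true ↔ p.toList <+: s.toList := by
  simp only [PySem.Str.startswith_eq]
  simp [PySem.Chars.startswith, List.isPrefixOf_iff_prefix]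

-- two table keys matching the same name are the same entry
theorem pv_uniq (name : String) (pc qc : String × (Int × Int × Int))
    (hpc : pc ∈ pvTable) (hqc : qc ∈ pvTable)
    (hp : PySem.Str.startswith name pc.1 = true)
    (hq : PySem.Str.startswith name qc.1 = true) : pc = qc := by
  rw [pv_startswith_iff] at hp hq
  rcases List.prefix_or_prefix_of_prefix hp hq with h | h
  · exact pvTable_no_chain pc hpc qc hqc (List.isPrefixOf_iff_prefix.mpr h)
  · exact (pvTable_no_chain qc hqc pc hpc (List.isPrefixOf_iff_prefix.mpr h)).symm

-- the fold keeps its state when no element can improve it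
theorem pv_fold_keep (name : String) (l : List (String × (Int × Int × Int)))
    (st : (Int × Int × Int) × Int)
    (h : ∀ pc ∈ l, PySem.Str.startswith name pc.1 = true → ¬ PySem.Str.len pc.1 > st.2) :
    l.foldl (pvStepA name) st = st := by
  induction l with
  | nil => rfl
  | cons pc t ih =>
    have hstep : pvStepA name st pc = st := by
      unfold pvStepA
      by_cases hs : PySem.Str.startswith name pc.1 = true
      · have hng := h pc (by simp) hs
        rw [if_neg]; exact fun hc => hng hc.2
      · rw [if_neg]; exact fun hc => hs hc.1
    simpa [List.foldl_cons, hstep] using ih (fun x hx hm => h x (by simp [hx]) hm)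

def pvColorOf : Option (String × (Int × Int × Int)) → Int × Int × Int
  | none => pvDefaultColor
  | some pc => pc.2

-- A's per-name fold returns the color of the unique matching entry (default if none)
theorem pv_foldA_char (name : String) :
    ∀ (l : List (String × (Int × Int × Int))), (∀ pc ∈ l, pc ∈ pvTable) →
      (l.foldl (pvStepA name) (pvDefaultColor, 0)).1 =
        pvColorOf (l.find? (fun pc => PySem.Str.startswith name pc.1)) := by
  intro l
  induction l with
  | nil => intro _; rfl
  | cons pc t ih =>
    intro hsub
    have hpcT : pc ∈ pvTable := hsub pc (by simp)
    by_cases hs : PySem.Str.startswith name pc.1 = true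
    · have hlen : (0:Int) < PySem.Str.len pc.1 := pvTable_len_pos pc hpcT
      have h1 : pvStepA name (pvDefaultColor, 0) pc = (pc.2, PySem.Str.len pc.1) := by
        unfold pvStepA
        rw [if_pos ⟨hs, hlen⟩]
      have h2 : t.foldl (pvStepA name) (pc.2, PySem.Str.len pc.1) = (pc.2, PySem.Str.len pc.1) := by
        apply pv_fold_keep
        intro qc hqc hm
        have heq : qc = pc := pv_uniq name qc pc (hsub qc (by simp [hqc])) hpcT hm hs
        subst heq; omega
      rw [List.foldl_cons, h1, h2, List.find?_cons_of_pos (p := fun pc : String × (Int × Int × Int) => PySem.Str.startswith name pc.1) hs]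
      rfl
    · have h1 : pvStepA name (pvDefaultColor, 0) pc = (pvDefaultColor, 0) := by
        unfold pvStepA
        rw [if_neg]; exact fun hc => hs hc.1
      rw [List.foldl_cons, h1, ih (fun x hx => hsub x (by simp [hx])),
        List.find?_cons_of_neg (p := fun pc : String × (Int × Int × Int) => PySem.Str.startswith name pc.1) (by simpa using hs)]

-- a hit of the hash map on a slice of the name IS a table entry matching the name
theorem pv_get_elim (name : String) (L : Int) (hL : (0:Int) ≤ L) (c : Int × Int × Int)
    (h : PySem.Dict.get? pvByPrefix (PySem.Str.slice name none (some L)) = some c) :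
    ∃ pc ∈ pvTable, PySem.Str.startswith name pc.1 = true ∧ pc.2 = c := by
  have hmem : (PySem.Str.slice name none (some L), c) ∈ pvByPrefix.items :=
    (PySem.Dict.get?_eq_some_iff_mem_items pvByPrefix _ _ pvKeys_nodup).mp h
  refine ⟨(PySem.Str.slice name none (some L), c), pvItems_sub _ hmem, ?_, rfl⟩
  rw [pv_startswith_iff]
  have : (PySem.Str.slice name none (some L)).toList = name.toList.take L.toNat := by
    simp only [PySem.Str.toList_slice]
    exact PySem.List.slice_to _ (hb := hL)
  rw [this]
  exact List.take_prefix _ _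

-- conversely, a matching table entry is hit when the name is sliced at the entry's key length
theorem pv_get_hit (name : String) (pc : String × (Int × Int × Int)) (hpc : pc ∈ pvTable)
    (hs : PySem.Str.startswith name pc.1 = true) :
    PySem.Dict.get? pvByPrefix (PySem.Str.slice name none (some (PySem.Str.len pc.1))) = some pc.2 := by
  have hkey : PySem.Str.slice name none (some (PySem.Str.len pc.1)) = pc.1 := by
    apply String.toList_inj.mp
    have h1 : (PySem.Str.slice name none (some (PySem.Str.len pc.1))).toList
        = name.toList.take (PySem.Str.len pc.1).toNat := by
      simp only [PySem.Str.toList_slice]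
      exact PySem.List.slice_to _ (hb := le_of_lt (pvTable_len_pos pc hpc))
    have h2 : (PySem.Str.len pc.1).toNat = pc.1.toList.length := by simp
    rw [h1, h2, (List.prefix_iff_eq_take.mp ((pv_startswith_iff name pc.1).mp hs)).symm]
  rw [hkey]
  exact (PySem.Dict.get?_eq_some_iff_mem_items pvByPrefix _ _ pvKeys_nodup).mpr
    (by simpa using pvTable_sub pc hpc)

-- B's length loop falls through to the default when every slice misses the map
theorem pv_colorFor_none (name : String) :
    ∀ (ls : List Int),
      (∀ L ∈ ls, PySem.Dict.get? pvByPrefix (PySem.Str.slice name none (some L)) = none) →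
      pvColorFor name ls = pvDefaultColor := by
  intro ls
  induction ls with
  | nil => intro _; rfl
  | cons L rest ih =>
    intro h
    rw [pvColorFor, h L (by simp)]
    exact ih (fun L' hL' => h L' (by simp [hL']))

-- B's length loop returns c when every hit yields c and some length hits
theorem pv_colorFor_hit (name : String) (c : Int × Int × Int) :
    ∀ (ls : List Int),
      (∀ L ∈ ls, ∀ c', PySem.Dict.get? pvByPrefix (PySem.Str.slice name none (some L)) = some c' → c' = c) →
      (∃ L ∈ ls, (PySem.Dict.get? pvByPrefix (PySem.Str.slice name none (some L))).isSome) →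
      pvColorFor name ls = c := by
  intro ls
  induction ls with
  | nil => rintro _ ⟨L, hL, _⟩; exact absurd hL (by simp)
  | cons L rest ih =>
    rintro hall ⟨L', hL', hsome⟩
    rw [pvColorFor]
    cases hg : PySem.Dict.get? pvByPrefix (PySem.Str.slice name none (some L)) with
    | some c' => exact hall L (by simp) c' hg
    | none =>
      refine ih (fun L'' h'' => hall L'' (by simp [h''])) ⟨L', ?_, hsome⟩
      rcases List.mem_cons.mp hL' with h | h
      · subst h; rw [hg] at hsome; exact absurd hsome (by simp)
      · exact h

-- per name, B computes the color of the unique matching table entry (default if none)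
theorem pv_per_name (name : String) :
    (pvTable.foldl (pvStepA name) (pvDefaultColor, 0)).1 = pvColorFor name pvLengths := by
  rw [pv_foldA_char name pvTable (fun _ h => h)]
  cases hF : pvTable.find? (fun pc => PySem.Str.startswith name pc.1) with
  | none =>
    have hno : ∀ pc ∈ pvTable, ¬ PySem.Str.startswith name pc.1 = true := by
      intro pc hpc
      have := List.find?_eq_none.mp hF pc hpc
      simpa using this
    rw [pv_colorFor_none name pvLengths]
    · rfl
    · intro L hL
      cases hg : PySem.Dict.get? pvByPrefix (PySem.Str.slice name none (some L)) with
      | none => rfl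
      | some c =>
        obtain ⟨pc, hpc, hs, _⟩ := pv_get_elim name L (pvLengths_nonneg L hL) c hg
        exact absurd hs (hno pc hpc)
  | some pc =>
    have hs : PySem.Str.startswith name pc.1 = true := by simpa using List.find?_some hF
    have hpcT : pc ∈ pvTable := List.mem_of_find?_eq_some hF
    rw [pv_colorFor_hit name pc.2 pvLengths]
    · rfl
    · intro L hL c' hg
      obtain ⟨qc, hqc, hqs, hqc2⟩ := pv_get_elim name L (pvLengths_nonneg L hL) c' hg
      rw [← hqc2, pv_uniq name qc pc hqc hpcT hqs hs]
    · exact ⟨PySem.Str.len pc.1, pvLengths_mem pc hpcT, by rw [pv_get_hit name pc hpcT hs]; rfl⟩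

-- ===== VERDICT (by name: the statement is the Claim_ definition above) =====
theorem build_color_lut_py_spec : Claim_equal_build_color_lut_py := by
  intro joint_names _
  unfold Spec_build_color_lut_py build_color_lut_py build_color_lut_py_alt
  rw [PySem.List.foldl_append_singleton_eq_map]
  exact List.map_congr_left (fun name _ => pv_per_name name)
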